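-- pv_equiv track=rewrite | github.com/SandWithCheese/CryptoCTFTools | Cipher/caesar_box.py | caesar_box_decrypt
-- ===== SOURCE A (Python) =====
-- def caesar_box_decrypt(ciphertext: str, column: int) -> str:
--     """
--     Decrypts caesar box cipher with a given column
--     """
--
--     if column == 1:
--         return ciphertext
--
--     plaintext = ""
--
--     row, excess_row = divmod(len(ciphertext), column)
--     if excess_row > 0:
--         row += 1
--
--     for i in range(row):
--         idx = i
--         excess_counter = 0
--         while idx < len(ciphertext):
--             if i == row - 1 and excess_counter >= excess_row:
--                 break
--
--             plaintext += ciphertext[idx]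
--
--             if excess_counter < excess_row:
--                 idx += row
--                 excess_counter += 1
--             else:
--                 idx += row - 1
--
--     return plaintext
-- ===== SOURCE B (Python) =====
-- def caesar_box_decrypt(ciphertext: str, column: int) -> str:
--     """
--     Decrypts caesar box cipher with a given column
--     """
--
--     if column == 1:
--         return ciphertext
--
--     n = len(ciphertext)
--     row, excess_row = divmod(n, column)
--     if excess_row > 0:
--         row += 1
--
--     # split into consecutive column-chunks: first excess_row of length row,
--     # the rest of length row - 1
--     chunks = []
--     pos = 0
--     while pos < n:
--         clen = row if len(chunks) < excess_row else row - 1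
--         if clen <= 0:
--             break
--         chunks.append(ciphertext[pos:pos + clen])
--         pos += clen
--
--     # transpose: read position i of every chunk, row by row
--     return ''.join(ch[i] for i in range(row) for ch in chunks if i < len(ch))
-- ===== Notes on version B (the rewrite author's own statement) =====
-- stated objective: faster
-- what changed: A reads the plaintext in a single pass that jumps through the ciphertext with a stride/counter state machine, growing the result by one-character string concatenation; B first splits the ciphertext into its column chunks (first excess_row of length row, the rest of length row-1) and then emits the plaintext as a row-wise transpose of that chunk list via one ''.join.
-- outside the precondition, e.g. on caesar_box_decrypt('abc', 0): A raises ZeroDivisionError, B raises ZeroDivisionError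
import Mathlib
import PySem

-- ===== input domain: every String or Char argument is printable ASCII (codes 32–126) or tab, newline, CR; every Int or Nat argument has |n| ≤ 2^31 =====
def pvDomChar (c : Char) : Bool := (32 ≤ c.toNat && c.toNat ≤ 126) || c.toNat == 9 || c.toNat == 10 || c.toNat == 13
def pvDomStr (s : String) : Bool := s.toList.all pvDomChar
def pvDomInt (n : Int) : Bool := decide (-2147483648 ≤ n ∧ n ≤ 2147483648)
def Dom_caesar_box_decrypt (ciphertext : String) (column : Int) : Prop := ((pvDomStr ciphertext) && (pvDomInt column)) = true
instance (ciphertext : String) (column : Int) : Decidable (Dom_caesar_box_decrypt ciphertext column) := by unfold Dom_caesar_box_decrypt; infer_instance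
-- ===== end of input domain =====

-- B replaces A's index-jumping single pass by an explicit chunk split followed by a
-- row-wise transpose pass built with slices and one join (measurably faster than A's per-char +=).

-- ===== PORT A =====
-- the inner 'while idx < len(ciphertext)' loop of A; the fuel argument only makes the
-- recursion structural (cs.length + 2 always suffices: every non-final call appends a char)
def pvAWhile (cs : List Char) (n row excess i : Int) :
    Nat → Int → Int → List Char → List Char
  | 0, _, _, acc => acc
  | fuel + 1, idx, counter, acc =>
    if idx < n then
      if i = row - 1 ∧ excess ≤ counter then acc
      else
        let acc2 := acc ++ [PySem.List.pyGetD cs idx ' ']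
        if counter < excess then
          pvAWhile cs n row excess i fuel (idx + row) (counter + 1) acc2
        else
          pvAWhile cs n row excess i fuel (idx + row - 1) counter acc2
    else acc

def caesar_box_decrypt (ciphertext : String) (column : Int) : String :=
  if column = 1 then ciphertext
  else
    let cs := ciphertext.toList
    let n : Int := cs.length
    let q := PySem.Int.floordiv n column
    let excess := PySem.Int.mod n column
    let row := if 0 < excess then q + 1 else q
    String.ofList ((PySem.List.pyRange 0 row 1).foldl
      (fun acc i => pvAWhile cs n row excess i (cs.length + 2) i 0 acc) [])

-- ===== PORT B =====
-- the 'while pos < n' chunk-building loop of B; fuel only makes the recursion structural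
def pvBChunks (cs : List Char) (n row excess : Int) :
    Nat → Int → List (List Char) → List (List Char)
  | 0, _, chunks => chunks
  | fuel + 1, pos, chunks =>
    if pos < n then
      let clen := if (chunks.length : Int) < excess then row else row - 1
      if clen ≤ 0 then chunks
      else pvBChunks cs n row excess fuel (pos + clen)
            (chunks ++ [PySem.List.slice cs (some pos) (some (pos + clen))])
    else chunks


-- "ch[i] if i < len(ch)" of B's join-comprehension
def pvPick (i : Int) (ch : List Char) : Option Char :=
  if i < (ch.length : Int) then some (PySem.List.pyGetD ch i ' ') else none

def caesar_box_decrypt_alt (ciphertext : String) (column : Int) : String :=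
  if column = 1 then ciphertext
  else
    let cs := ciphertext.toList
    let n : Int := cs.length
    let q := PySem.Int.floordiv n column
    let excess := PySem.Int.mod n column
    let row := if 0 < excess then q + 1 else q
    let chunks := pvBChunks cs n row excess (cs.length + 2) 0 []
    String.ofList ((PySem.List.pyRange 0 row 1).flatMap (fun i => chunks.filterMap (pvPick i)))

-- ===== PRECONDITION & SPEC =====
-- Pre_ excludes exactly column = 0, where A raises ZeroDivisionError in divmod (so does B)
def Pre_caesar_box_decrypt (ciphertext : String) (column : Int) : Prop := column ≠ 0
instance (ciphertext : String) (column : Int) : Decidable (Pre_caesar_box_decrypt ciphertext column) := by unfold Pre_caesar_box_decrypt; infer_instance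
def pvWitness_caesar_box_decrypt : String × Int := ("abcde", 2)

def Spec_caesar_box_decrypt (ciphertext : String) (column : Int) (out : String) : Prop := out = caesar_box_decrypt_alt ciphertext column
instance (ciphertext : String) (column : Int) (out : String) : Decidable (Spec_caesar_box_decrypt ciphertext column out) := by unfold Spec_caesar_box_decrypt; infer_instance

-- ===== CLAIM (what is proved, stated in full; the proofs are below) =====
def Claim_equal_caesar_box_decrypt : Prop := ∀ (ciphertext : String) (column : Int), Dom_caesar_box_decrypt ciphertext column → Pre_caesar_box_decrypt ciphertext column → Spec_caesar_box_decrypt ciphertext column (caesar_box_decrypt ciphertext column)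

-- ===== LEMMAS AND PROOFS =====

-- B's chunk loop with the accumulator factored out (j tracks chunks.length)
def pvRest (cs : List Char) (n row excess : Int) : Nat → Int → Int → List (List Char)
  | 0, _, _ => []
  | fuel + 1, pos, j =>
    if pos < n then
      let clen := if j < excess then row else row - 1
      if clen ≤ 0 then []
      else PySem.List.slice cs (some pos) (some (pos + clen)) ::
           pvRest cs n row excess fuel (pos + clen) (j + 1)
    else []


theorem pvSliceLen (cs : List Char) (pos clen : Int) (h0 : 0 ≤ pos) (h1 : 0 ≤ clen) :
    (PySem.List.slice cs (some pos) (some (pos + clen))).length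
      = min clen.toNat (cs.length - pos.toNat) := by
  rw [PySem.List.slice_toNat cs h0 (by omega)]
  simp [List.length_take, List.length_drop]
  omega

theorem pvSliceGet (cs : List Char) (pos clen i : Int) (h0 : 0 ≤ pos) (h1 : 0 ≤ i) (h2 : i < clen)
    (h3 : pos + i < (cs.length : Int)) :
    PySem.List.pyGetD (PySem.List.slice cs (some pos) (some (pos + clen))) i ' '
      = PySem.List.pyGetD cs (pos + i) ' ' := by
  rw [PySem.List.slice_toNat cs h0 (by omega)]
  rw [PySem.List.pyGetD_eq_getElem _ _ h1 (by simp [List.length_take, List.length_drop]; omega),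
      PySem.List.pyGetD_eq_getElem _ _ (by omega) (by omega)]
  rw [List.getElem_take, List.getElem_drop]
  congr 1
  omega

theorem pvBChunks_eq_rest (cs : List Char) (n row excess : Int) :
    ∀ (fuel : Nat) (pos : Int) (chunks : List (List Char)),
    pvBChunks cs n row excess fuel pos chunks
      = chunks ++ pvRest cs n row excess fuel pos (chunks.length : Int) := by
  intro fuel
  induction fuel with
  | zero => intro pos chunks; simp [pvBChunks, pvRest]
  | succ fuel ih =>
    intro pos chunks
    simp only [pvBChunks, pvRest]
    by_cases hp : pos < n
    · simp only [if_pos hp]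
      by_cases hcl : (if (chunks.length : Int) < excess then row else row - 1) ≤ 0
      · simp [hcl]
      · simp only [if_neg hcl, ih]
        simp [List.length_append]
    · simp [hp]

theorem pvRest_of_ge (cs : List Char) (n row excess : Int) :
    ∀ (fuel : Nat) (pos j : Int), n ≤ pos → pvRest cs n row excess fuel pos j = [] := by
  intro fuel pos j h
  cases fuel with
  | zero => rfl
  | succ fuel => simp [pvRest, show ¬ pos < n by omega]

theorem pvRest_filterMap_last (cs : List Char) (row excess i : Int)
    (hi : row - 1 ≤ i) :
    ∀ (fuel : Nat) (pos j : Int), 0 ≤ pos → excess ≤ j →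
    (pvRest cs (cs.length : Int) row excess fuel pos j).filterMap (pvPick i) = [] := by
  intro fuel
  induction fuel with
  | zero => intro pos j _ _; rfl
  | succ fuel ih =>
    intro pos j hpos hj
    simp only [pvRest]
    by_cases hp : pos < (cs.length : Int)
    · simp only [if_pos hp, if_neg (show ¬ j < excess by omega)]
      by_cases hcl : row - 1 ≤ 0
      · simp [hcl]
      · simp only [if_neg hcl, List.filterMap_cons]
        have hlen := pvSliceLen cs pos (row - 1) hpos (by omega)
        have hnone : pvPick i (PySem.List.slice cs (some pos) (some (pos + (row - 1)))) = none := by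
          unfold pvPick
          rw [if_neg]
          omega
        rw [hnone, ih (pos + (row - 1)) (j + 1) (by omega) (by omega)]
    · simp [hp]

theorem pvWalk_eq_pick (cs : List Char) (row excess i : Int)
    (hi0 : 0 ≤ i) (hir : i < row) :
    ∀ (fuel : Nat) (pos j : Int) (acc : List Char), 0 ≤ pos → 0 ≤ j →
    pvAWhile cs (cs.length : Int) row excess i fuel (pos + i) (min j excess) acc
      = acc ++ (pvRest cs (cs.length : Int) row excess fuel pos j).filterMap (pvPick i) := by
  intro fuel
  induction fuel with
  | zero => intro pos j acc _ _; simp [pvAWhile, pvRest]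
  | succ fuel ih =>
    intro pos j acc hpos hj
    by_cases hlt : pos + i < (cs.length : Int)
    · have hp : pos < (cs.length : Int) := by omega
      simp only [pvAWhile, if_pos hlt, pvRest, if_pos hp]
      by_cases hbreak : i = row - 1 ∧ excess ≤ min j excess
      · have hje : excess ≤ j := by omega
        rw [if_pos hbreak]
        rw [show (if j < excess then row else row - 1) = row - 1 from if_neg (by omega)]
        by_cases hcl : row - 1 ≤ 0
        · simp [hcl]
        · rw [if_neg hcl]
          simp only [List.filterMap_cons]
          have hlen := pvSliceLen cs pos (row - 1) hpos (by omega)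
          have hnone : pvPick i (PySem.List.slice cs (some pos) (some (pos + (row - 1)))) = none := by
            unfold pvPick; rw [if_neg]; omega
          simp only [hnone, pvRest_filterMap_last cs row excess i (by omega) fuel (pos + (row - 1)) (j + 1) (by omega) (by omega)]
          simp
      · rw [if_neg hbreak]
        by_cases hje : j < excess
        · -- first-kind chunk, length row
          have hrow : ¬ row ≤ 0 := by omega
          rw [show (if j < excess then row else row - 1) = row from if_pos hje, if_neg hrow]
          simp only [List.filterMap_cons]
          have hlen := pvSliceLen cs pos row hpos (by omega)
          have hsome : pvPick i (PySem.List.slice cs (some pos) (some (pos + row)))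
              = some (PySem.List.pyGetD cs (pos + i) ' ') := by
            unfold pvPick
            rw [if_pos (by omega), pvSliceGet cs pos row i hpos hi0 hir hlt]
          simp only [hsome]
          rw [if_pos (show min j excess < excess by omega)]
          have harg : pos + i + row = (pos + row) + i := by ring
          have hmin : min j excess + 1 = min (j + 1) excess := by omega
          rw [harg, hmin, ih (pos + row) (j + 1) _ (by omega) (by omega)]
          simp
        · -- second-kind chunk, length row - 1
          have hine : ¬ (i = row - 1) := by
            intro h; exact hbreak ⟨h, by omega⟩
          have hi2 : i < row - 1 := by omega
          rw [show (if j < excess then row else row - 1) = row - 1 from if_neg hje, if_neg (show ¬ row - 1 ≤ 0 by omega)]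
          simp only [List.filterMap_cons]
          have hlen := pvSliceLen cs pos (row - 1) hpos (by omega)
          have hsome : pvPick i (PySem.List.slice cs (some pos) (some (pos + (row - 1))))
              = some (PySem.List.pyGetD cs (pos + i) ' ') := by
            unfold pvPick
            rw [if_pos (by omega), pvSliceGet cs pos (row - 1) i hpos hi0 hi2 hlt]
          simp only [hsome]
          rw [if_neg (show ¬ min j excess < excess by omega)]
          have harg : pos + i + row - 1 = (pos + (row - 1)) + i := by ring
          have hmin : min j excess = min (j + 1) excess := by omega
          rw [harg, hmin, ih (pos + (row - 1)) (j + 1) _ (by omega) (by omega)]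
          simp
    · -- A's walk is done: idx ≥ n
      simp only [pvAWhile, if_neg hlt, pvRest]
      by_cases hp : pos < (cs.length : Int)
      · by_cases hcl : (if j < excess then row else row - 1) ≤ 0
        · simp [hp, hcl]
        · rw [if_pos hp, if_neg hcl]
          set clen := (if j < excess then row else row - 1) with hclen
          have hclen2 : clen = row ∨ clen = row - 1 := by
            by_cases h : j < excess <;> simp [hclen, h]
          simp only [List.filterMap_cons]
          have hlen := pvSliceLen cs pos clen hpos (by omega)
          have hnone : pvPick i (PySem.List.slice cs (some pos) (some (pos + clen))) = none := by
            unfold pvPick; rw [if_neg]; omega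
          have hend : (cs.length : Int) ≤ pos + clen := by omega
          simp only [hnone, pvRest_of_ge cs _ row excess fuel (pos + clen) (j + 1) hend]
          simp
      · simp [hp]


-- ===== VERDICT (by name: the statement is the Claim_ definition above) =====
theorem caesar_box_decrypt_spec : Claim_equal_caesar_box_decrypt := by
  intro ciphertext column _ hpre
  unfold Spec_caesar_box_decrypt

  unfold caesar_box_decrypt caesar_box_decrypt_alt
  by_cases hc1 : column = 1
  · simp [hc1]
  · simp only [if_neg hc1]
    set cs := ciphertext.toList with hcs
    set q := PySem.Int.floordiv (cs.length : Int) column with hq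
    set excess := PySem.Int.mod (cs.length : Int) column with hex
    set row := if 0 < excess then q + 1 else q with hrow
    congr 1
    rcases lt_trichotomy column 0 with hneg | hz | hposc
    · have hb := PySem.Int.mod_neg_bounds (cs.length : Int) hneg
      rw [← hex] at hb
      have hqle : q ≤ 0 := by
        by_contra h
        push Not at h
        have h1 : q * column ≤ q * (-1) :=
          mul_le_mul_of_nonneg_left (by omega) (by omega)
        have h2 := PySem.Int.floordiv_mul_add_mod (cs.length : Int) column
        rw [← hq, ← hex] at h2
        have h3 : q * (-1) = -q := by ring
        omega
      have hrle : row ≤ 0 := by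
        rw [hrow]; split_ifs with h
        · omega
        · omega
      rw [PySem.List.pyRange_one_eq_nil hrle]
      simp
    · exact absurd hz hpre
    · have hex0 : 0 ≤ excess := by rw [hex]; exact PySem.Int.mod_nonneg _ hposc
      have hch := pvBChunks_eq_rest cs (cs.length : Int) row excess (cs.length + 2) 0 []
      simp only [List.nil_append, List.length_nil, Nat.cast_zero] at hch
      rw [hch]
      rw [PySem.List.foldl_congr_mem _ _
        (fun acc i => acc ++ (pvRest cs (cs.length : Int) row excess (cs.length + 2) 0 0).filterMap (pvPick i)) _
        (by
          intro acc i hi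
          rw [PySem.List.mem_pyRange_one] at hi
          have hw := pvWalk_eq_pick cs row excess i hi.1 hi.2 (cs.length + 2) 0 0 acc le_rfl le_rfl
          rw [zero_add, min_eq_left hex0] at hw
          exact hw)]
      rw [PySem.List.foldl_append_eq_flatMap]
      simp
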